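-- pv_equiv track=rewrite | github.com/Miranics/Code-test-prep | Functions/smt4.py | zigzag_triples
-- ===== SOURCE A (Python) =====
-- def zigzag_triples(numbers):
--     result = []
--     for i in range(len(numbers) - 2):
--         a, b, c = numbers[i], numbers[i+1], numbers[i+2]
--         if (a < b > c) or (a > b < c):
--             result.append(1)
--         else:
--             result.append(0)
--     return result
-- ===== SOURCE B (Python) =====
-- def zigzag_triples(numbers):
--     # Trend-sign decomposition: first tabulate consecutive comparison signs,
--     # then a triple is a zigzag exactly when adjacent signs are strictly opposite.
--     signs = []
--     for x, y in zip(numbers, numbers[1:]):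
--         if x < y:
--             signs.append(1)
--         elif y < x:
--             signs.append(-1)
--         else:
--             signs.append(0)
--     return [1 if s * t == -1 else 0 for s, t in zip(signs, signs[1:])]
-- ===== Notes on version B (the rewrite author's own statement) =====
-- stated objective: alternative
-- what changed: Replaces the direct indexed triple test with a two-stage decomposition: first build the list of consecutive trend signs (+1/-1/0), then mark each adjacent sign pair whose product is -1 (a strict sign change).
import Mathlib
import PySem

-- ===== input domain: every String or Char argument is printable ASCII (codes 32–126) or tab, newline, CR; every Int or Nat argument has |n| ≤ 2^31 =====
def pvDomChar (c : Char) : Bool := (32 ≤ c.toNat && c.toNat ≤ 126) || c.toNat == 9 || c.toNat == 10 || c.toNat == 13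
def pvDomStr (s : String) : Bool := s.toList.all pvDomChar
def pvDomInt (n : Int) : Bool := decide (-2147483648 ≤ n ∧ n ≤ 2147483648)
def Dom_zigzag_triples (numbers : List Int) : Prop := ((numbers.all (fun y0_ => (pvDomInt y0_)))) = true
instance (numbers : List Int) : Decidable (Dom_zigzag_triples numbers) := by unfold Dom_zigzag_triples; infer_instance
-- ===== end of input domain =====

-- B rebuilds the answer from a table of consecutive trend signs instead of indexed triple reads; alternative decomposition, same cost.

-- ===== PORT A =====
def zigzag_triples (numbers : List Int) : List Int :=
  (PySem.List.pyRange 0 ((numbers.length : Int) - 2) 1).foldl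
    (fun result i =>
      let a := PySem.List.pyGetD numbers i 0          -- index always in range here, so pyGetD is exact
      let b := PySem.List.pyGetD numbers (i+1) 0
      let c := PySem.List.pyGetD numbers (i+2) 0
      if (a < b ∧ b > c) ∨ (a > b ∧ b < c) then result ++ [1] else result ++ [0]) []

-- ===== PORT B =====
def pvSign (x y : Int) : Int := if x < y then 1 else if y < x then -1 else 0

def zigzag_triples_alt (numbers : List Int) : List Int :=
  let signs := List.zipWith pvSign numbers numbers.tail   -- numbers[1:] on a list = tail
  List.zipWith (fun s t => if s * t = -1 then (1 : Int) else 0) signs signs.tail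

-- ===== PRECONDITION & SPEC =====
def Spec_zigzag_triples (numbers : List Int) (out : List Int) : Prop := out = zigzag_triples_alt numbers
instance (numbers : List Int) (out : List Int) : Decidable (Spec_zigzag_triples numbers out) := by unfold Spec_zigzag_triples; infer_instance

-- ===== CLAIM (what is proved, stated in full; the proofs are below) =====
def Claim_equal_zigzag_triples : Prop := ∀ (numbers : List Int), Dom_zigzag_triples numbers → Spec_zigzag_triples numbers (zigzag_triples numbers)

-- ===== LEMMAS AND PROOFS =====

/-- The common reference: scan every consecutive triple. -/
def triScan : List Int → List Int
  | a :: b :: c :: r => (if (a < b ∧ b > c) ∨ (a > b ∧ b < c) then 1 else 0) :: triScan (b :: c :: r)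
  | _ => []

theorem sign_change (a b c : Int) :
    (if pvSign a b * pvSign b c = -1 then (1 : Int) else 0)
      = (if (a < b ∧ b > c) ∨ (a > b ∧ b < c) then 1 else 0) := by
  unfold pvSign
  split_ifs <;> omega

theorem if_append (p : Prop) [Decidable p] (r : List Int) (x y : Int) :
    (if p then r ++ [x] else r ++ [y]) = r ++ [if p then x else y] := by
  split_ifs <;> rfl

theorem alt_eq_triScan : ∀ (xs : List Int), zigzag_triples_alt xs = triScan xs
  | [] => rfl
  | [_] => rfl
  | [_, _] => rfl
  | a :: b :: c :: r => by
    have ih := alt_eq_triScan (b :: c :: r)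
    rw [triScan, ← sign_change a b c, ← ih]
    simp only [zigzag_triples_alt, List.tail_cons, List.zipWith]

theorem range_eq_triScan : ∀ (xs : List Int),
    (List.range (xs.length - 2)).map
      (fun k => if (xs.getD k 0 < xs.getD (k+1) 0 ∧ xs.getD (k+1) 0 > xs.getD (k+2) 0)
                  ∨ (xs.getD k 0 > xs.getD (k+1) 0 ∧ xs.getD (k+1) 0 < xs.getD (k+2) 0)
                then (1 : Int) else 0) = triScan xs
  | [] => rfl
  | [_] => rfl
  | [_, _] => rfl
  | a :: b :: c :: r => by
    have ih := range_eq_triScan (b :: c :: r)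
    simp only [List.length_cons]
    rw [show r.length + 1 + 1 + 1 - 2 = r.length + 1 from by omega,
        List.range_succ_eq_map, List.map_cons, List.map_map]
    simp only [List.length_cons] at ih
    rw [triScan, ← ih]
    simp [Function.comp_def, List.getD]

theorem a_eq_triScan (xs : List Int) : zigzag_triples xs = triScan xs := by
  simp only [zigzag_triples, if_append]
  rw [PySem.List.foldl_append_singleton_eq_map, PySem.List.pyRange_one]
  rw [show ((xs.length : Int) - 2 - 0).toNat = xs.length - 2 from by omega]
  rw [List.map_map, List.nil_append, ← range_eq_triScan xs]
  apply List.map_congr_left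
  intro k _
  simp only [Function.comp_apply, zero_add]
  rw [show ((k : Int) + 1) = ((k + 1 : Nat) : Int) from by omega,
      show ((k : Int) + 2) = ((k + 2 : Nat) : Int) from by omega]
  simp only [PySem.List.pyGetD_natCast]

-- ===== VERDICT (by name: the statement is the Claim_ definition above) =====
theorem zigzag_triples_spec : Claim_equal_zigzag_triples := by
  intro numbers _
  unfold Spec_zigzag_triples
  rw [a_eq_triScan, alt_eq_triScan]
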